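-- pv_equiv track=rewrite | github.com/KianCandelario/cs201-exercs | Exercise2/roundingManyWays.py | divisorOfTen
-- ===== SOURCE A (Python) =====
-- def divisorOfTen(divisors):
--     # Empty set
--     divsOfTen = set()
--     for divs in divisors:
--         t = divs
--         while t % 5 == 0:
--             t //= 5
--         while t % 2 == 0:
--             t //= 2
--         if t == 1:
--             divsOfTen.add(divs)
--
--     return divsOfTen
-- ===== SOURCE B (Python) =====
-- def _gcd(a, b):
--     while b:
--         a, b = b, a % b
--     return abs(a)
--
-- def divisorOfTen(divisors):
--     divsOfTen = set()
--     for divs in divisors: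
--         t = divs
--         while True:
--             g = _gcd(t, 10)
--             if g == 1:
--                 break
--             t //= g
--         if t == 1:
--             divsOfTen.add(divs)
--     return divsOfTen
-- ===== Notes on version B (the rewrite author's own statement) =====
-- stated objective: alternative
-- what changed: Replaced A's two separate strip-all-5s and strip-all-2s loops per element by a single Euclid-style reduction loop that repeatedly divides by gcd(t, 10) until the gcd is 1.
import Mathlib
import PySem

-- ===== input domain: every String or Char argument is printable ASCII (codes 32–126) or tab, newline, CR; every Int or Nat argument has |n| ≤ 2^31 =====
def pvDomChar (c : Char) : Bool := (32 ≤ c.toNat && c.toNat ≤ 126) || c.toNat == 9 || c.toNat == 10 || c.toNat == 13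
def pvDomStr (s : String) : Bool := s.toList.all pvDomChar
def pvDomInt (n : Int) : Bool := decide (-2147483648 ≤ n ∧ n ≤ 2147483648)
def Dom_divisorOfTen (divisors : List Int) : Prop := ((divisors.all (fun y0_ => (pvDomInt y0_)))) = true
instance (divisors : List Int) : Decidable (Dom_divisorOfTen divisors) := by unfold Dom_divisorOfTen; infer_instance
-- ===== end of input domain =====

-- B replaces A's two separate strip-5s/strip-2s loops by one gcd-with-10 reduction loop
-- (objective: alternative algorithm, same cost). Equality is about the returned set;
-- both diverge on 0, so Pre_ excludes lists containing 0.

-- ===== PORT A =====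
-- termination measure for the strip loops (cited by 'decreasing_by' below)
theorem pvStripDec (d t : Int) (hd : 1 < d) (h0 : t ≠ 0)
    (h : PySem.Int.mod t d = 0) : (PySem.Int.floordiv t d).natAbs < t.natAbs := by
  rw [PySem.Int.mod_eq_zero_iff_dvd] at h
  rw [PySem.Int.floordiv_eq_ediv_of_pos (by omega)]
  obtain ⟨k, rfl⟩ := h
  rw [Int.mul_ediv_cancel_left _ (by omega)]
  have h2d : 2 ≤ d.natAbs := by omega
  simp only [Int.natAbs_mul]
  have hk : k.natAbs ≠ 0 := by
    intro hk0; apply h0; simp only [Int.natAbs_eq_zero] at hk0; simp [hk0]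
  have hmul := Nat.mul_le_mul_right k.natAbs h2d
  omega

-- the 'while t % 5 == 0: t //= 5' loop of A; the 't ≠ 0' guard only makes the
-- recursion total (Python diverges at t = 0, which Pre_ excludes)
def pvStrip5 (t : Int) : Int :=
  if h : t ≠ 0 ∧ PySem.Int.mod t 5 = 0 then pvStrip5 (PySem.Int.floordiv t 5) else t
termination_by t.natAbs
decreasing_by exact pvStripDec 5 t (by norm_num) h.1 h.2

-- the 'while t % 2 == 0: t //= 2' loop of A
def pvStrip2 (t : Int) : Int :=
  if h : t ≠ 0 ∧ PySem.Int.mod t 2 = 0 then pvStrip2 (PySem.Int.floordiv t 2) else t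
termination_by t.natAbs
decreasing_by exact pvStripDec 2 t (by norm_num) h.1 h.2

def divisorOfTen (divisors : List Int) : List Int :=
  divisors.foldl
    (fun divsOfTen divs =>
      let t := pvStrip2 (pvStrip5 divs)
      if t = 1 then PySem.Set.add divsOfTen divs else divsOfTen)
    PySem.Set.empty

-- ===== PORT B =====
-- B's helper _gcd: Euclid's loop, 'while b: a, b = b, a % b; return abs(a)'
-- termination measure for Euclid's loop (cited by 'decreasing_by' below)
theorem pvGcdDec (a b : Int) (h : b ≠ 0) : (PySem.Int.mod a b).natAbs < b.natAbs := by
  rcases lt_or_gt_of_ne h with hb | hb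
  · have h1 := PySem.Int.mod_neg_bounds a hb; omega
  · have h1 := PySem.Int.mod_nonneg a hb
    have h2 := PySem.Int.mod_lt a hb; omega

def pvGcd (a b : Int) : Int :=
  if h : b ≠ 0 then pvGcd b (PySem.Int.mod a b) else |a|
termination_by b.natAbs
decreasing_by exact pvGcdDec a b h

-- pvGcd computes Int.gcd (used by pvGcdLoop's termination proof, cited below)
theorem pvGcd_eq_gcd (a b : Int) : pvGcd a b = Int.gcd a b := by
  induction a, b using pvGcd.induct with
  | case1 a b hb ih =>
    rw [pvGcd.eq_def, dif_pos hb, ih]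
    have hm : PySem.Int.mod a b = a - PySem.Int.floordiv a b * b := by
      have := PySem.Int.floordiv_mul_add_mod a b; omega
    rw [hm, Int.gcd_comm]
    exact congrArg _ (Int.gcd_sub_mul_right_left b a (PySem.Int.floordiv a b))
  | case2 a b hb =>
    rw [pvGcd.eq_def, dif_neg hb]
    have hb0 : b = 0 := by omega
    subst hb0
    rw [Int.gcd_zero_right]
    exact Int.abs_eq_natAbs a

-- B's inner loop: 'while True: g = _gcd(t, 10); if g == 1: break; t //= g';
-- the 't ≠ 0' guard only makes the recursion total (Python diverges at t = 0)
-- termination measure for the gcd-reduction loop (cited by 'decreasing_by' below)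
theorem pvGcdLoopDec (t : Int) (hg1 : ¬ pvGcd t 10 = 1) (h0 : t ≠ 0) :
    (PySem.Int.floordiv t (pvGcd t 10)).natAbs < t.natAbs := by
  rw [pvGcd_eq_gcd] at hg1 ⊢
  have hdvd : (↑(Int.gcd t 10) : Int) ∣ t := Int.gcd_dvd_left t 10
  have hne : Int.gcd t 10 ≠ 0 := by simp [Int.gcd_eq_zero_iff]
  have hge : 2 ≤ Int.gcd t 10 := by omega
  obtain ⟨k, hk⟩ := hdvd
  have hk0 : k ≠ 0 := by rintro rfl; simp at hk; exact h0 hk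
  have hfd : PySem.Int.floordiv t ↑(Int.gcd t 10) = k := by
    rw [PySem.Int.floordiv_eq_ediv_of_pos (by omega)]
    calc t / (↑(Int.gcd t 10) : Int) = ↑(Int.gcd t 10) * k / ↑(Int.gcd t 10) := by rw [← hk]
      _ = k := Int.mul_ediv_cancel_left k (by omega)
  rw [hfd]
  have habs : t.natAbs = Int.gcd t 10 * k.natAbs := by
    conv_lhs => rw [hk]
    rw [Int.natAbs_mul, Int.natAbs_natCast]
  have h1k : 1 ≤ k.natAbs := by omega
  have h2k : 2 * k.natAbs ≤ Int.gcd t 10 * k.natAbs := Nat.mul_le_mul_right _ hge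
  omega

def pvGcdLoop (t : Int) : Int :=
  let g := pvGcd t 10
  if h : ¬ g = 1 ∧ t ≠ 0 then pvGcdLoop (PySem.Int.floordiv t g) else t
termination_by t.natAbs
decreasing_by exact pvGcdLoopDec t h.1 h.2

def divisorOfTen_alt (divisors : List Int) : List Int :=
  divisors.foldl
    (fun divsOfTen divs =>
      let t := pvGcdLoop divs
      if t = 1 then PySem.Set.add divsOfTen divs else divsOfTen)
    PySem.Set.empty

-- ===== PRECONDITION & SPEC =====
-- Pre_ excludes lists containing 0: there A's first while loop never terminates
-- (0 % 5 == 0 and 0 // 5 == 0), so A returns on exactly the lists of nonzero ints.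
def Pre_divisorOfTen (divisors : List Int) : Prop := (0 : Int) ∉ divisors
instance (divisors : List Int) : Decidable (Pre_divisorOfTen divisors) := by
  unfold Pre_divisorOfTen; infer_instance

def pvWitness_divisorOfTen : List Int := [10, 3, -2, 1, 64, 100]

def Spec_divisorOfTen (divisors : List Int) (out : List Int) : Prop := out = divisorOfTen_alt divisors
instance (divisors : List Int) (out : List Int) : Decidable (Spec_divisorOfTen divisors out) := by unfold Spec_divisorOfTen; infer_instance

-- ===== CLAIM (what is proved, stated in full; the proofs are below) =====
def Claim_equal_divisorOfTen : Prop := ∀ (divisors : List Int), Dom_divisorOfTen divisors → Pre_divisorOfTen divisors → Spec_divisorOfTen divisors (divisorOfTen divisors)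

-- ===== LEMMAS AND PROOFS =====

theorem strip5_of_dvd {t : Int} (h0 : t ≠ 0) (h : (5:Int) ∣ t) :
    pvStrip5 t = pvStrip5 (t / 5) := by
  rw [pvStrip5.eq_def, dif_pos ⟨h0, (PySem.Int.mod_eq_zero_iff_dvd t 5).2 h⟩,
    PySem.Int.floordiv_eq_ediv_of_pos (by norm_num)]

theorem strip5_of_not_dvd {t : Int} (h : ¬ (5:Int) ∣ t) : pvStrip5 t = t := by
  rw [pvStrip5.eq_def, dif_neg]
  rw [PySem.Int.mod_eq_zero_iff_dvd]
  tauto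

theorem strip2_of_dvd {t : Int} (h0 : t ≠ 0) (h : (2:Int) ∣ t) :
    pvStrip2 t = pvStrip2 (t / 2) := by
  rw [pvStrip2.eq_def, dif_pos ⟨h0, (PySem.Int.mod_eq_zero_iff_dvd t 2).2 h⟩,
    PySem.Int.floordiv_eq_ediv_of_pos (by norm_num)]

theorem strip2_of_not_dvd {t : Int} (h : ¬ (2:Int) ∣ t) : pvStrip2 t = t := by
  rw [pvStrip2.eq_def, dif_neg]
  rw [PySem.Int.mod_eq_zero_iff_dvd]
  tauto

theorem strip5_ne_zero : ∀ (n : Nat) (t : Int), t.natAbs ≤ n → t ≠ 0 → pvStrip5 t ≠ 0 := by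
  intro n
  induction n with
  | zero => intro t h h0; omega
  | succ n ih =>
    intro t h h0
    by_cases h5 : (5:Int) ∣ t
    · obtain ⟨k, rfl⟩ := h5
      rw [strip5_of_dvd h0 ⟨k, rfl⟩, Int.mul_ediv_cancel_left _ (by norm_num)]
      have hk : k ≠ 0 := by rintro rfl; simp at h0
      exact ih k (by simp [Int.natAbs_mul] at h; omega) hk
    · rw [strip5_of_not_dvd h5]; exact h0

-- stripping 5s commutes with a factor 2
theorem strip5_two_mul : ∀ (n : Nat) (u : Int), u.natAbs ≤ n → u ≠ 0 →
    pvStrip5 (2 * u) = 2 * pvStrip5 u := by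
  intro n
  induction n with
  | zero => intro u h h0; omega
  | succ n ih =>
    intro u h h0
    by_cases h5 : (5:Int) ∣ u
    · obtain ⟨v, rfl⟩ := h5
      have hv : v ≠ 0 := by rintro rfl; simp at h0
      have e1 : pvStrip5 (2 * (5 * v)) = pvStrip5 (2 * v) := by
        have : (2 : Int) * (5 * v) = 5 * (2 * v) := by ring
        rw [this, strip5_of_dvd (by simpa using h0) ⟨2 * v, rfl⟩,
          Int.mul_ediv_cancel_left _ (by norm_num)]
      have e2 : pvStrip5 (5 * v) = pvStrip5 v := by
        rw [strip5_of_dvd h0 ⟨v, rfl⟩, Int.mul_ediv_cancel_left _ (by norm_num)]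
      rw [e1, e2, ih v (by simp [Int.natAbs_mul] at h; omega) hv]
    · have h5' : ¬ (5:Int) ∣ 2 * u := by
        intro hd; apply h5; omega
      rw [strip5_of_not_dvd h5', strip5_of_not_dvd h5]

theorem gcdLoop_stop {t : Int} (h : Int.gcd t 10 = 1) : pvGcdLoop t = t := by
  rw [pvGcdLoop.eq_def]
  simp [pvGcd_eq_gcd, h]

theorem gcdLoop_step {t : Int} (h0 : t ≠ 0) (h : Int.gcd t 10 ≠ 1) :
    pvGcdLoop t = pvGcdLoop (PySem.Int.floordiv t (Int.gcd t 10)) := by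
  rw [pvGcdLoop.eq_def]
  simp only [pvGcd_eq_gcd]
  rw [dif_pos ⟨by exact_mod_cast h, h0⟩]

-- the key equivalence of the two reduction loops
theorem gcdLoop_eq_strips : ∀ (n : Nat) (t : Int), t.natAbs ≤ n → t ≠ 0 →
    pvGcdLoop t = pvStrip2 (pvStrip5 t) := by
  intro n
  induction n with
  | zero => intro t h h0; omega
  | succ n ih =>
    intro t h h0
    by_cases hg : Int.gcd t 10 = 1
    · have h5 : ¬ (5:Int) ∣ t := by
        intro hd
        have : (5:Nat) ∣ Int.gcd t 10 := Int.dvd_gcd (by exact_mod_cast hd) (by norm_num)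
        rw [hg] at this; norm_num at this
      have h2 : ¬ (2:Int) ∣ t := by
        intro hd
        have : (2:Nat) ∣ Int.gcd t 10 := Int.dvd_gcd (by exact_mod_cast hd) (by norm_num)
        rw [hg] at this; norm_num at this
      rw [gcdLoop_stop hg, strip5_of_not_dvd h5, strip2_of_not_dvd h2]
    · have hdvd10 : Int.gcd t 10 ∣ 10 := by
        have := Int.gcd_dvd_right t 10
        exact_mod_cast this
      have hne : Int.gcd t 10 ≠ 0 := by simp [Int.gcd_eq_zero_iff]
      have hcases : Int.gcd t 10 = 2 ∨ Int.gcd t 10 = 5 ∨ Int.gcd t 10 = 10 := by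
        have hle := Nat.le_of_dvd (by norm_num) hdvd10
        interval_cases h : Int.gcd t 10 <;> revert hdvd10 <;> simp_all
      have hdvdt : (↑(Int.gcd t 10) : Int) ∣ t := Int.gcd_dvd_left t 10
      rw [gcdLoop_step h0 hg]
      rcases hcases with hg2 | hg5 | hg10
      · -- g = 2 : 2 ∣ t, ¬ 5 ∣ t
        have hdvdt2 : (2:Int) ∣ t := by rw [hg2] at hdvdt; exact_mod_cast hdvdt
        have h5 : ¬ (5:Int) ∣ t := by
          intro hd
          have : (5:Nat) ∣ Int.gcd t 10 := Int.dvd_gcd (by exact_mod_cast hd) (by norm_num)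
          rw [hg2] at this; norm_num at this
        obtain ⟨u, rfl⟩ := hdvdt2
        have hu : u ≠ 0 := by rintro rfl; simp at h0
        have hfd : PySem.Int.floordiv (2 * u) (Int.gcd (2 * u) 10 : Nat) = u := by
          rw [hg2, PySem.Int.floordiv_eq_ediv_of_pos (by norm_num)]
          push_cast
          exact Int.mul_ediv_cancel_left _ (by norm_num)
        rw [hfd]
        have h5u : ¬ (5:Int) ∣ u := by intro hd; exact h5 (by omega)
        rw [strip5_of_not_dvd h5]
        have hcan : (2:Int) * u / 2 = u := Int.mul_ediv_cancel_left u (by norm_num)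
        rw [strip2_of_dvd h0 ⟨u, rfl⟩, hcan]
        rw [ih u (by simp [Int.natAbs_mul] at h; omega) hu,
          strip5_of_not_dvd h5u]
      · -- g = 5 : 5 ∣ t
        have hdvdt5 : (5:Int) ∣ t := by rw [hg5] at hdvdt; exact_mod_cast hdvdt
        obtain ⟨u, rfl⟩ := hdvdt5
        have hu : u ≠ 0 := by rintro rfl; simp at h0
        have hfd : PySem.Int.floordiv (5 * u) (Int.gcd (5 * u) 10 : Nat) = u := by
          rw [hg5, PySem.Int.floordiv_eq_ediv_of_pos (by norm_num)]
          push_cast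
          exact Int.mul_ediv_cancel_left _ (by norm_num)
        rw [hfd, strip5_of_dvd h0 ⟨u, rfl⟩, Int.mul_ediv_cancel_left _ (by norm_num)]
        exact ih u (by simp [Int.natAbs_mul] at h; omega) hu
      · -- g = 10 : 10 ∣ t
        have hdvdt10 : (10:Int) ∣ t := by rw [hg10] at hdvdt; exact_mod_cast hdvdt
        obtain ⟨u, rfl⟩ := hdvdt10
        have hu : u ≠ 0 := by rintro rfl; simp at h0
        have hfd : PySem.Int.floordiv (10 * u) (Int.gcd (10 * u) 10 : Nat) = u := by
          rw [hg10, PySem.Int.floordiv_eq_ediv_of_pos (by norm_num)]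
          push_cast
          exact Int.mul_ediv_cancel_left _ (by norm_num)
        rw [hfd]
        have e1 : pvStrip5 (10 * u) = pvStrip5 (2 * u) := by
          have : (10 : Int) * u = 5 * (2 * u) := by ring
          rw [this, strip5_of_dvd (by simpa using h0) ⟨2 * u, rfl⟩,
            Int.mul_ediv_cancel_left _ (by norm_num)]
        have e2 : pvStrip5 (2 * u) = 2 * pvStrip5 u :=
          strip5_two_mul u.natAbs u le_rfl hu
        have hsu : pvStrip5 u ≠ 0 := strip5_ne_zero u.natAbs u le_rfl hu
        have e3 : pvStrip2 (2 * pvStrip5 u) = pvStrip2 (pvStrip5 u) := by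
          rw [strip2_of_dvd (by simpa using hsu) ⟨pvStrip5 u, rfl⟩,
            Int.mul_ediv_cancel_left _ (by norm_num)]
        rw [e1, e2, e3]
        exact ih u (by simp [Int.natAbs_mul] at h; omega) hu

theorem fold_eq : ∀ (l : List Int) (acc : List Int), (0 : Int) ∉ l →
    l.foldl (fun divsOfTen divs =>
        let t := pvStrip2 (pvStrip5 divs)
        if t = 1 then PySem.Set.add divsOfTen divs else divsOfTen) acc
      = l.foldl (fun divsOfTen divs =>
        let t := pvGcdLoop divs
        if t = 1 then PySem.Set.add divsOfTen divs else divsOfTen) acc := by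
  intro l
  induction l with
  | nil => intro acc _; rfl
  | cons x xs ih =>
    intro acc hmem
    have hx : x ≠ 0 := by rintro rfl; exact hmem (List.mem_cons_self)
    have hxs : (0 : Int) ∉ xs := fun hm => hmem (List.mem_cons_of_mem _ hm)
    simp only [List.foldl_cons]
    rw [gcdLoop_eq_strips x.natAbs x le_rfl hx]
    exact ih _ hxs

-- ===== VERDICT (by name: the statement is the Claim_ definition above) =====
theorem divisorOfTen_spec : Claim_equal_divisorOfTen := by
  intro divisors _ hpre
  unfold Spec_divisorOfTen divisorOfTen divisorOfTen_alt
  exact fold_eq divisors PySem.Set.empty hpre
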